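-- pv_equiv track=rewrite | github.com/cloudctlio/cloudctl | cloudctl/commands/diff.py | _diff_sets
-- ===== SOURCE A (Python) =====
-- def _diff_sets(left_names: set, right_names: set, left_label: str, right_label: str, rtype: str) -> list[dict]:
--     rows: list[dict] = []
--     for name in sorted(left_names | right_names):
--         in_left  = name in left_names
--         in_right = name in right_names
--         if in_left and in_right:
--             status = "[green]both[/green]"
--         elif in_left:
--             status = f"[yellow]only in {left_label}[/yellow]"
--         else:
--             status = f"[cyan]only in {right_label}[/cyan]"
--         rows.append({
--             "Type": rtype,
--             "Name": name,
--             "Status": status,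
--             left_label: "yes" if in_left  else "—",
--             right_label: "yes" if in_right else "—",
--         })
--     return rows
-- ===== SOURCE B (Python) =====
-- def _diff_sets(left_names: set, right_names: set, left_label: str, right_label: str, rtype: str) -> list[dict]:
--     def row(name, status, in_left, in_right):
--         return {
--             "Type": rtype,
--             "Name": name,
--             "Status": status,
--             left_label: "yes" if in_left else "—",
--             right_label: "yes" if in_right else "—",
--         }
--     tagged = [(n, row(n, "[green]both[/green]", True, True))
--               for n in left_names & right_names]
--     tagged += [(n, row(n, f"[yellow]only in {left_label}[/yellow]", True, False))
--                for n in left_names - right_names]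
--     tagged += [(n, row(n, f"[cyan]only in {right_label}[/cyan]", False, True))
--                for n in right_names - left_names]
--     return [r for _, r in sorted(tagged, key=lambda t: t[0])]
-- ===== Notes on version B (the rewrite author's own statement) =====
-- stated objective: alternative
-- what changed: Instead of A's single loop over the sorted union that tests membership per name, B computes the three disjoint groups by set algebra (intersection and the two differences), builds each group's rows with its fixed status string, and returns the tagged rows sorted once by name.
import Mathlib
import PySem

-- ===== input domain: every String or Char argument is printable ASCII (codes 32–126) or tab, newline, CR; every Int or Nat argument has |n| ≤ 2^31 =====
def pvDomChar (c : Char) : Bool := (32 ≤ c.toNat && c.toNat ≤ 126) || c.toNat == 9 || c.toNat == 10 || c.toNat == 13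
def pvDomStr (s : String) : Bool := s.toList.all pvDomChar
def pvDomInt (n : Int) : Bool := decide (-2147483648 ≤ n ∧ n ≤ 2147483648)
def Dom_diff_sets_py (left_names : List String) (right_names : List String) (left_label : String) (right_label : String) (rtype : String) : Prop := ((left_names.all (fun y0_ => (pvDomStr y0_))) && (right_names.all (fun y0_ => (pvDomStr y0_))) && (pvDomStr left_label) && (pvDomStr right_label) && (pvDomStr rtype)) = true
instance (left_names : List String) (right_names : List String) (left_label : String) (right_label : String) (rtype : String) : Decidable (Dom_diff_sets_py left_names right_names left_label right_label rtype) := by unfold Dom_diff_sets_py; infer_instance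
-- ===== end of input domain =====

-- B rebuilds the diff by set algebra (both / only-left / only-right groups, then one sort by name)
-- instead of A's single loop over the sorted union; objective: alternative decomposition, same cost.

-- ===== PORT A =====
-- A's dict literal {"Type": rtype, "Name": name, "Status": status, left_label: lv, right_label: rv}, as its items list
def mkRowA (rt name status ll lv rl rv : String) : List (String × String) :=
  (((((PySem.Dict.empty.insert "Type" rt).insert "Name" name).insert "Status" status).insert ll lv).insert rl rv).items

def diff_sets_py (left_names : List String) (right_names : List String) (left_label : String) (right_label : String) (rtype : String) : List (List (String × String)) :=
  (PySem.List.sorted (PySem.Set.union (PySem.Set.ofList left_names) right_names) (fun x => x) false).foldl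
    (fun rows name =>
      let in_left := left_names.contains name
      let in_right := right_names.contains name
      let status :=
        if in_left && in_right then "[green]both[/green]"
        else if in_left then "[yellow]only in " ++ left_label ++ "[/yellow]"
        else "[cyan]only in " ++ right_label ++ "[/cyan]"
      rows ++ [mkRowA rtype name status left_label (if in_left then "yes" else "—") right_label (if in_right then "yes" else "—")])
    []

-- ===== PORT B =====
-- B's row helper: the same dict literal, with the membership flags passed in
def mkRowB (rt name status ll : String) (inl : Bool) (rl : String) (inr : Bool) : List (String × String) :=
  (((((PySem.Dict.empty.insert "Type" rt).insert "Name" name).insert "Status" status).insert ll (if inl then "yes" else "—")).insert rl (if inr then "yes" else "—")).items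

def diff_sets_py_alt (left_names : List String) (right_names : List String) (left_label : String) (right_label : String) (rtype : String) : List (List (String × String)) :=
  let tagged :=
    (PySem.Set.inter (PySem.Set.ofList left_names) right_names).map
      (fun n => (n, mkRowB rtype n "[green]both[/green]" left_label true right_label true))
    ++ (PySem.Set.diff (PySem.Set.ofList left_names) right_names).map
      (fun n => (n, mkRowB rtype n ("[yellow]only in " ++ left_label ++ "[/yellow]") left_label true right_label false))
    ++ (PySem.Set.diff (PySem.Set.ofList right_names) left_names).map
      (fun n => (n, mkRowB rtype n ("[cyan]only in " ++ right_label ++ "[/cyan]") left_label false right_label true))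
  (PySem.List.sorted tagged (fun t => t.1) false).map (fun t => t.2)

-- ===== PRECONDITION & SPEC =====
def Spec_diff_sets_py (left_names : List String) (right_names : List String) (left_label : String) (right_label : String) (rtype : String) (out : List (List (String × String))) : Prop := out = diff_sets_py_alt left_names right_names left_label right_label rtype
instance (left_names : List String) (right_names : List String) (left_label : String) (right_label : String) (rtype : String) (out : List (List (String × String))) : Decidable (Spec_diff_sets_py left_names right_names left_label right_label rtype out) := by unfold Spec_diff_sets_py; infer_instance

-- ===== CLAIM (what is proved, stated in full; the proofs are below) =====
def Claim_equal_diff_sets_py : Prop := ∀ (left_names : List String) (right_names : List String) (left_label : String) (right_label : String) (rtype : String), Dom_diff_sets_py left_names right_names left_label right_label rtype → Spec_diff_sets_py left_names right_names left_label right_label rtype (diff_sets_py left_names right_names left_label right_label rtype)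


-- ===== LEMMAS AND PROOFS =====

-- the row A builds for a given name, as a function of the name (used to describe both ports)
def pvF (l r : List String) (ll rl rt : String) (n : String) : List (String × String) :=
  mkRowA rt n
    (if l.contains n && r.contains n then "[green]both[/green]"
     else if l.contains n then "[yellow]only in " ++ ll ++ "[/yellow]"
     else "[cyan]only in " ++ rl ++ "[/cyan]")
    ll (if l.contains n then "yes" else "—") rl (if r.contains n then "yes" else "—")

lemma portA_eq_map (l r : List String) (ll rl rt : String) :
    diff_sets_py l r ll rl rt
      = (PySem.List.sorted (PySem.Set.union (PySem.Set.ofList l) r) (fun x => x) false).map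
          (pvF l r ll rl rt) := by
  simp only [diff_sets_py]
  exact PySem.List.foldl_append_singleton_eq_map (pvF l r ll rl rt) _ []

lemma groups_perm (l r : List String) :
    (PySem.List.sorted (PySem.Set.union (PySem.Set.ofList l) r) (fun x => x) false).Perm
      ((PySem.Set.inter (PySem.Set.ofList l) r)
        ++ (PySem.Set.diff (PySem.Set.ofList l) r)
        ++ (PySem.Set.diff (PySem.Set.ofList r) l)) := by
  apply (PySem.List.sorted_perm _ _ _).trans
  rw [List.perm_ext_iff_of_nodup]
  · intro x
    simp only [List.mem_append, PySem.Set.mem_union, PySem.Set.mem_inter,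
      PySem.Set.mem_diff, PySem.Set.mem_ofList]
    tauto
  · exact PySem.Set.nodup_union _ _ (PySem.Set.nodup_ofList l)
  · refine List.Nodup.append (List.Nodup.append
      (PySem.Set.nodup_inter _ _ (PySem.Set.nodup_ofList l))
      (PySem.Set.nodup_diff _ _ (PySem.Set.nodup_ofList l)) ?_)
      (PySem.Set.nodup_diff _ _ (PySem.Set.nodup_ofList r)) ?_ <;>
      · rw [List.disjoint_left]
        intro a h1 h2
        simp only [List.mem_append, PySem.Set.mem_inter, PySem.Set.mem_diff,
          PySem.Set.mem_ofList] at h1 h2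
        tauto

lemma sorted_union_pairwise_lt (l r : List String) :
    (PySem.List.sorted (PySem.Set.union (PySem.Set.ofList l) r) (fun x => x) false).Pairwise (· < ·) := by
  have h : PySem.Set.union (PySem.Set.ofList l) r = PySem.Set.ofList (l ++ r) := by
    rw [PySem.Set.ofList_append]; rfl
  rw [h]
  exact PySem.List.sorted_ofList_pairwise_lt (l ++ r)

lemma portB_sorted_eq (l r : List String) (ll rl rt : String) :
    diff_sets_py_alt l r ll rl rt
      = ((PySem.List.sorted (PySem.Set.union (PySem.Set.ofList l) r) (fun x => x) false).map
          (fun n => (n, pvF l r ll rl rt n))).map (fun t => t.2) := by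
  simp only [diff_sets_py_alt]
  congr 1
  apply PySem.List.sorted_eq_of_perm_of_pairwise_lt
  · -- permutation: the sorted-map list is a permutation of the tagged concatenation
    have h1 : (PySem.Set.inter (PySem.Set.ofList l) r).map
        (fun n => (n, mkRowB rt n "[green]both[/green]" ll true rl true))
        = (PySem.Set.inter (PySem.Set.ofList l) r).map (fun n => (n, pvF l r ll rl rt n)) := by
      apply List.map_congr_left
      intro n hn
      rw [PySem.Set.mem_inter, PySem.Set.mem_ofList] at hn
      simp [pvF, mkRowA, mkRowB, hn.1, hn.2]
    have h2 : (PySem.Set.diff (PySem.Set.ofList l) r).map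
        (fun n => (n, mkRowB rt n ("[yellow]only in " ++ ll ++ "[/yellow]") ll true rl false))
        = (PySem.Set.diff (PySem.Set.ofList l) r).map (fun n => (n, pvF l r ll rl rt n)) := by
      apply List.map_congr_left
      intro n hn
      rw [PySem.Set.mem_diff, PySem.Set.mem_ofList] at hn
      simp [pvF, mkRowA, mkRowB, hn.1, hn.2]
    have h3 : (PySem.Set.diff (PySem.Set.ofList r) l).map
        (fun n => (n, mkRowB rt n ("[cyan]only in " ++ rl ++ "[/cyan]") ll false rl true))
        = (PySem.Set.diff (PySem.Set.ofList r) l).map (fun n => (n, pvF l r ll rl rt n)) := by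
      apply List.map_congr_left
      intro n hn
      rw [PySem.Set.mem_diff, PySem.Set.mem_ofList] at hn
      simp [pvF, mkRowA, mkRowB, hn.1, hn.2]
    rw [h1, h2, h3, ← List.map_append, ← List.map_append]
    exact List.Perm.map _ (groups_perm l r)
  · -- pairwise: first components strictly increase
    rw [List.pairwise_map]
    exact sorted_union_pairwise_lt l r

-- ===== VERDICT (by name: the statement is the Claim_ definition above) =====
theorem diff_sets_py_spec : Claim_equal_diff_sets_py := by
  intro l r ll rl rt _
  unfold Spec_diff_sets_py
  rw [portA_eq_map, portB_sorted_eq, List.map_map]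
  rfl
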